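-- pv_equiv track=rewrite | github.com/masztalskipiotr/note_generator | Note.py | count_distance
-- ===== SOURCE A (Python) =====
-- notes = [["c", 0], ["d", 2], ["e", 4], ["f", 5], ["g", 7], ["a",9], ["b",11]]
--
-- def count_degree(note_str):
--     for idx, el in enumerate(notes):
--         if note_str[:1] == notes[idx][0]:
--             degree = idx
--             break
--     for char in note_str[1:]:
--         if char == "'": degree += 7
--         if char == ",": degree -= 7
--     return degree
--
-- def count_distance(note_str):
--     degree = count_degree(note_str)
--     distance = notes[degree % 7][1]
--     for char in note_str[1:]:
--         if char == "i": distance += 1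
--         if char == "e": distance -= 1
--         if char == "'": distance += 12
--         if char == ",": distance -= 12
--     return distance
-- ===== SOURCE B (Python) =====
-- # B: drop count_degree and the % 7 re-indexing entirely -- the base semitone
-- # depends only on the first letter -- then one pass over the modifiers.
-- _base = [("c", 0), ("d", 2), ("e", 4), ("f", 5), ("g", 7), ("a", 9), ("b", 11)]
-- _delta = {"i": 1, "e": -1, "'": 12, ",": -12}
--
-- def count_distance(note_str):
--     for letter, semitone in _base:
--         if note_str[:1] == letter:
--             distance = semitone
--             break
--     for char in note_str[1:]:
--         distance += _delta.get(char, 0)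
--     return distance
-- ===== Notes on version B (the rewrite author's own statement) =====
-- stated objective: simpler
-- what changed: Removes the count_degree helper and the notes[degree % 7] re-indexing (octave marks add multiples of 7 that cancel mod 7): B reads the base semitone straight from the first letter and accumulates the modifier deltas from a dict in one pass over the tail.
import Mathlib
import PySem

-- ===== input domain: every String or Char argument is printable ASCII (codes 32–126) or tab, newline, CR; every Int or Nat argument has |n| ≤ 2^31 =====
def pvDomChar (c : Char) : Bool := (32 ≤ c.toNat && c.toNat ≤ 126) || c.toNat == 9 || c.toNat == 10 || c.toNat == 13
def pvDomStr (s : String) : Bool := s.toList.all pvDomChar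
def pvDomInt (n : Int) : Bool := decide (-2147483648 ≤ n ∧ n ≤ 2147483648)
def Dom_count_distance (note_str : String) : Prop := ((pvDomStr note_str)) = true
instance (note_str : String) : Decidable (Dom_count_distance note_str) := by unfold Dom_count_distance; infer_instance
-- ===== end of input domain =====

-- B removes the count_degree helper and the notes[degree % 7] re-indexing: the base
-- semitone depends only on the first letter, then one pass sums the modifier deltas.

-- ===== PORT A =====
def pvNotes : List (String × Int) :=
  [("c", 0), ("d", 2), ("e", 4), ("f", 5), ("g", 7), ("a", 9), ("b", 11)]

-- the first 'for idx, el in enumerate(notes): if note_str[:1] == notes[idx][0]: degree = idx; break'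
-- (none = 'degree' stays unbound, Python raises UnboundLocalError: excluded by Pre_)
def pvFindIdx : List (String × Int) → Nat → List Char → Option Nat
  | [], _, _ => none
  | (name, _) :: rest, idx, s1 =>
      if s1 = name.toList then some idx else pvFindIdx rest (idx + 1) s1

def count_degree (note_str : String) : Int :=
  match pvFindIdx pvNotes 0 (PySem.List.slice note_str.toList none (some 1)) with
  | none => 0  -- unreachable under Pre_ (Python raises UnboundLocalError here)
  | some idx =>
      (PySem.List.slice note_str.toList (some 1) none).foldl
        (fun d c =>
          let d := if c = '\'' then d + 7 else d
          if c = ',' then d - 7 else d) (idx : Int)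

def count_distance (note_str : String) : Int :=
  let degree := count_degree note_str
  let distance :=
    ((PySem.List.pyGet? pvNotes (PySem.Int.mod degree 7)).map (·.2)).getD 0
  (PySem.List.slice note_str.toList (some 1) none).foldl
    (fun d c =>
      let d := if c = 'i' then d + 1 else d
      let d := if c = 'e' then d - 1 else d
      let d := if c = '\'' then d + 12 else d
      if c = ',' then d - 12 else d) distance

-- ===== PORT B =====
def pvBase : List (Char × Int) :=
  [('c', 0), ('d', 2), ('e', 4), ('f', 5), ('g', 7), ('a', 9), ('b', 11)]

def pvDelta : List (Char × Int) := [('i', 1), ('e', -1), ('\'', 12), (',', -12)]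

def count_distance_alt (note_str : String) : Int :=
  match note_str.toList with
  | [] => 0  -- unreachable under Pre_ (Python B raises UnboundLocalError here)
  | c :: rest =>
      match pvBase.find? (fun p => p.1 = c) with
      | none => 0  -- unreachable under Pre_ (UnboundLocalError)
      | some (_, semitone) =>
          rest.foldl (fun d ch => d + ((pvDelta.lookup ch).getD 0)) semitone

-- ===== PRECONDITION & SPEC =====
-- Pre_ excludes exactly the inputs where A raises UnboundLocalError (first character
-- missing or not one of the seven note letters); B raises there too.
def Pre_count_distance (note_str : String) : Prop :=
  note_str.toList.headD ' ' ∈ ['c', 'd', 'e', 'f', 'g', 'a', 'b'] ∧ note_str.toList ≠ []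
instance (note_str : String) : Decidable (Pre_count_distance note_str) := by
  unfold Pre_count_distance; infer_instance

def pvWitness_count_distance : String := "ci'"

def Spec_count_distance (note_str : String) (out : Int) : Prop := out = count_distance_alt note_str
instance (note_str : String) (out : Int) : Decidable (Spec_count_distance note_str out) := by unfold Spec_count_distance; infer_instance

-- ===== CLAIM (what is proved, stated in full; the proofs are below) =====
def Claim_equal_count_distance : Prop := ∀ (note_str : String), Dom_count_distance note_str → Pre_count_distance note_str → Spec_count_distance note_str (count_distance note_str)

-- ===== LEMMAS AND PROOFS =====

-- A's degree fold only changes the accumulator by ±7, so its value mod 7 is fixed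
theorem degree_fold_emod (rest : List Char) (start : Int) :
    ((rest.foldl
      (fun d c =>
        let d := if c = '\'' then d + 7 else d
        if c = ',' then d - 7 else d) start) % 7) = start % 7 := by
  induction rest generalizing start with
  | nil => rfl
  | cons c rest ih =>
      simp only [List.foldl_cons]
      rw [ih]
      by_cases h1 : c = '\'' <;> by_cases h2 : c = ',' <;> simp [h1, h2]

-- A's per-character distance step equals B's table lookup step
theorem step_eq (d : Int) (c : Char) :
    (let d1 := if c = 'i' then d + 1 else d
     let d2 := if c = 'e' then d1 - 1 else d1
     let d3 := if c = '\'' then d2 + 12 else d2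
     if c = ',' then d3 - 12 else d3) = d + ((pvDelta.lookup c).getD 0) := by
  by_cases h1 : c = 'i' <;> by_cases h2 : c = 'e' <;> by_cases h3 : c = '\'' <;>
    by_cases h4 : c = ',' <;>
  first
    | (simp_all [pvDelta, List.lookup]; omega)
    | (simp_all [pvDelta, List.lookup]; done)
    | (have e1 : (c == 'i') = false := by simp [h1]
       have e2 : (c == 'e') = false := by simp [h2]
       have e3 : (c == '\'') = false := by simp [h3]
       have e4 : (c == ',') = false := by simp [h4]
       simp [pvDelta, List.lookup, e1, e2, e3, e4, h1, h2, h3, h4])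

theorem dist_fold_eq (rest : List Char) (start : Int) :
    (rest.foldl
      (fun d c =>
        let d := if c = 'i' then d + 1 else d
        let d := if c = 'e' then d - 1 else d
        let d := if c = '\'' then d + 12 else d
        if c = ',' then d - 12 else d) start) =
    rest.foldl (fun d ch => d + ((pvDelta.lookup ch).getD 0)) start := by
  induction rest generalizing start with
  | nil => rfl
  | cons c rest ih => simp only [List.foldl_cons, step_eq]


theorem main_case (c : Char) (rest : List Char) (s : String) (idx : Nat) (base : Int)
    (hs : s.toList = c :: rest)
    (hfind : pvFindIdx pvNotes 0 [c] = some idx)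
    (hidx : idx < 7)
    (hget : (PySem.List.pyGet? pvNotes (idx : Int)).map (·.2) = some base)
    (hfindB : pvBase.find? (fun p => p.1 = c) = some (c, base)) :
    count_distance s = count_distance_alt s := by
  have hslice1 : PySem.List.slice s.toList none (some 1) = [c] := by rw [hs]; rfl
  have hslice2 : PySem.List.slice s.toList (some 1) none = rest := by
    rw [hs, PySem.List.slice_from_one]
    rfl
  unfold count_distance count_distance_alt count_degree
  rw [hslice1, hslice2, hs]
  simp only [hfind, hfindB]
  rw [PySem.Int.mod_eq_emod_of_pos (by norm_num), degree_fold_emod]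
  have h7 : ((idx : Int) % 7) = (idx : Int) := by omega
  rw [h7, hget]
  simp only [Option.getD_some]
  exact dist_fold_eq rest base

-- ===== VERDICT (by name: the statement is the Claim_ definition above) =====
theorem count_distance_spec : Claim_equal_count_distance := by
  intro s _ hpre
  obtain ⟨hmem, hne⟩ := hpre
  unfold Spec_count_distance
  match h : s.toList with
  | [] => exact absurd h hne
  | c :: rest =>
      rw [h] at hmem
      simp only [List.headD_cons] at hmem
      have : c = 'c' ∨ c = 'd' ∨ c = 'e' ∨ c = 'f' ∨ c = 'g' ∨ c = 'a' ∨ c = 'b' := by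
        simpa using hmem
      rcases this with hc | hc | hc | hc | hc | hc | hc <;> subst hc
      · exact main_case 'c' rest s 0 0 h (by decide) (by decide) (by decide) (by decide)
      · exact main_case 'd' rest s 1 2 h (by decide) (by decide) (by decide) (by decide)
      · exact main_case 'e' rest s 2 4 h (by decide) (by decide) (by decide) (by decide)
      · exact main_case 'f' rest s 3 5 h (by decide) (by decide) (by decide) (by decide)
      · exact main_case 'g' rest s 4 7 h (by decide) (by decide) (by decide) (by decide)
      · exact main_case 'a' rest s 5 9 h (by decide) (by decide) (by decide) (by decide)
      · exact main_case 'b' rest s 6 11 h (by decide) (by decide) (by decide) (by decide)
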